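-- pv_equiv track=rewrite | github.com/Independent-AI-Labs/local-super-agents | hype/hype/indexing/structured_data_mapper.py | is_valid_header
-- ===== SOURCE A (Python) =====
-- import string
--
-- def is_valid_header(header: list) -> bool:
--     """
--     Check if a given list of strings represents a valid CSV header.
--
--     :param header: List of header strings.
--     :return: True if valid, False otherwise.
--     """
--     valid_chars = set(string.ascii_letters)  # Allow only alphabetic characters
--
--     for field in header:
--         # Check if all characters in the field are alphabetic
--         if not all(char in valid_chars for char in field):
--             return False
--         # Check for spaces
--         if ' ' in field:
--             return False
--         # Check field length
--         if len(field) > 255: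
--             return False
--
--     return True
-- ===== SOURCE B (Python) =====
-- import re
--
-- _FIELD_RE = re.compile(r'[A-Za-z]*')
--
-- def is_valid_header(header: list) -> bool:
--     """Valid iff every field is an ASCII-letters-only string of length <= 255."""
--     return all(_FIELD_RE.fullmatch(field) is not None and len(field) <= 255
--                for field in header)
-- ===== Notes on version B (the rewrite author's own statement) =====
-- stated objective: idiomatic
-- what changed: Replaces the explicit loop with three sequential per-field checks (set membership per character, space scan, length) by a single all(...) over a compiled regular-expression full-match [A-Za-z]* plus the length bound; the space check and the hand-built character set disappear.
import Mathlib
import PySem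

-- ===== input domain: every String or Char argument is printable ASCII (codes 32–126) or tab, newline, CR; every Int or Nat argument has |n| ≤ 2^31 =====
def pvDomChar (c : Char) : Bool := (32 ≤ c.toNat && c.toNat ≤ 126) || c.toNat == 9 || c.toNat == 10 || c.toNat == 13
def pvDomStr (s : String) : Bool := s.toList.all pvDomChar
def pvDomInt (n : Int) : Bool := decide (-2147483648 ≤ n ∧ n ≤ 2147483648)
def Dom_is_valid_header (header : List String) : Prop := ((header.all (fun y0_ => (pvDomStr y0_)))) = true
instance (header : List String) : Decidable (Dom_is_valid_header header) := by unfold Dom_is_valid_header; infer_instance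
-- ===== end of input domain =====

-- B replaces A's loop of per-field checks (character-set scan, space scan, length) by one
-- all(...) over a regex full-match [A-Za-z]* plus the length bound (idiomatic; same cost).

-- ===== PORT A =====
-- valid_chars = set(string.ascii_letters)
def pvValidChars : PySem.Set Char :=
  PySem.Set.ofList "abcdefghijklmnopqrstuvwxyzABCDEFGHIJKLMNOPQRSTUVWXYZ".toList

def is_valid_header : List String → Bool
  | [] => true
  | field :: rest =>
    -- if not all(char in valid_chars for char in field): return False
    if !(field.toList.all (fun c => PySem.Set.contains pvValidChars c)) then false
    -- if ' ' in field: return False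
    else if field.toList.contains ' ' then false
    -- if len(field) > 255: return False
    else if 255 < field.toList.length then false
    else is_valid_header rest

-- ===== PORT B =====
-- re.fullmatch(r'[A-Za-z]*', field) is not None: every character lies in A-Z or a-z
def pvLetterRe (c : Char) : Bool := ('A' ≤ c && c ≤ 'Z') || ('a' ≤ c && c ≤ 'z')

def is_valid_header_alt (header : List String) : Bool :=
  header.all (fun field => field.toList.all pvLetterRe && field.toList.length ≤ 255)

-- ===== PRECONDITION & SPEC =====
def Spec_is_valid_header (header : List String) (out : Bool) : Prop := out = is_valid_header_alt header
instance (header : List String) (out : Bool) : Decidable (Spec_is_valid_header header out) := by unfold Spec_is_valid_header; infer_instance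

-- ===== CLAIM (what is proved, stated in full; the proofs are below) =====
def Claim_equal_is_valid_header : Prop := ∀ (header : List String), Dom_is_valid_header header → Spec_is_valid_header header (is_valid_header header)

-- ===== LEMMAS AND PROOFS =====

-- 'c in set(string.ascii_letters)' agrees with the regex character-class test for every Char
set_option maxRecDepth 8000 in
theorem pv_contains_eq_letterRe (c : Char) :
    PySem.Set.contains pvValidChars c = pvLetterRe c := by
  rw [Bool.eq_iff_iff, PySem.Set.contains_iff, pvValidChars, PySem.Set.mem_ofList]
  have hs : "abcdefghijklmnopqrstuvwxyzABCDEFGHIJKLMNOPQRSTUVWXYZ".toList =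
      ['a','b','c','d','e','f','g','h','i','j','k','l','m','n','o','p','q','r','s','t','u','v','w','x','y','z','A','B','C','D','E','F','G','H','I','J','K','L','M','N','O','P','Q','R','S','T','U','V','W','X','Y','Z'] := rfl
  rw [hs]
  simp only [List.mem_cons, List.not_mem_nil, or_false, Char.ext_iff, UInt32.ext_iff,
    pvLetterRe, Bool.or_eq_true, Bool.and_eq_true, decide_eq_true_eq, Char.le_def,
    UInt32.le_iff_toNat_le]
  simp only [Char.reduceVal, UInt32.reduceToNat]
  omega

-- a field of letters contains no space, so A's space check is redundant
theorem pv_no_space (l : List Char) (h : l.all pvLetterRe = true) :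
    l.contains ' ' = false := by
  rw [Bool.eq_false_iff]
  intro hc
  have hm : ' ' ∈ l := by simpa using hc
  have := List.all_eq_true.mp h ' ' hm
  simp [pvLetterRe] at this

theorem pv_equiv (header : List String) :
    is_valid_header header = is_valid_header_alt header := by
  induction header with
  | nil => rfl
  | cons f rest ih =>
    simp only [is_valid_header, is_valid_header_alt, List.all_cons]
    rw [show (fun c => PySem.Set.contains pvValidChars c) = pvLetterRe from
      funext pv_contains_eq_letterRe]
    by_cases hall : f.toList.all pvLetterRe = true
    · rw [hall, pv_no_space _ hall]
      simp only [is_valid_header_alt] at ih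
      by_cases hlen : 255 < f.length
      · simp [hlen, Nat.not_le.mpr hlen]
      · simp [hlen, Nat.le_of_not_lt hlen, ih]
    · rw [Bool.not_eq_true] at hall
      simp [hall]

-- ===== VERDICT (by name: the statement is the Claim_ definition above) =====
theorem is_valid_header_spec : Claim_equal_is_valid_header := by
  intro header _
  unfold Spec_is_valid_header
  exact pv_equiv header
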